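-- pv_equiv track=rewrite | github.com/vidhir0417/HollowKnight_RouteOptimization | project/base/individuals.py | no_constraint
-- ===== SOURCE A (Python) =====
-- def no_constraint(areas):
--     """
--     Checks if a list of areas satisfies certain constraints.
--
--     Args:
--         areas (list): A list representing the visited areas.
--
--     Returns:
--         bool: True if the areas satisfy the constraints, False otherwise.
--    """
--
--     # Ensuring CS is not visited right after QG
--     if 5 in areas and 6 in areas:
--         cs_index = areas.index(6)
--         qg_index = areas.index(5)
--
--         if cs_index == qg_index + 1:
--             return False
--
--     # Ensure RG is in the last half
--     if 8 in areas:
--         rg_index = areas.index(8)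
--         if rg_index < len(areas) // 2:
--             return False
--
--     # Avoid having a repeated area (could happen after a crossover/mutation)
--     for area in areas[1:-1]:
--         if areas.count(area) > 1:
--             return False
--
--
--     return True
-- ===== SOURCE B (Python) =====
-- def no_constraint(areas):
--     # Single streaming pass with early exit: an automaton carries the first-5
--     # index, first-sighting flags for 6 and 8, and seen / middle-seen sets,
--     # deciding every constraint the moment its witnessing element is scanned.
--     n = len(areas)
--     half = n // 2
--     f5 = None
--     seen6 = False
--     seen8 = False
--     seen = set()
--     mid_seen = set()
--     for i, v in enumerate(areas):
--         if v in seen and (i < n - 1 or v in mid_seen):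
--             return False
--         if v == 5 and f5 is None:
--             f5 = i
--         elif v == 6 and not seen6:
--             seen6 = True
--             if f5 == i - 1:
--                 return False
--         elif v == 8 and not seen8:
--             seen8 = True
--             if i < half:
--                 return False
--         seen.add(v)
--         if 1 <= i <= n - 2:
--             mid_seen.add(v)
--     return True
-- ===== Notes on version B (the rewrite author's own statement) =====
-- stated objective: faster
-- what changed: Replaces A's four staged scans (two .index lookups per constraint plus an O(n^2) .count-per-middle-element loop) with a single streaming early-exit pass over enumerate(areas) that carries the first-5 index, first-sighting flags for 6 and 8, and seen/middle-seen sets, deciding each constraint the moment its witnessing element is scanned.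
import Mathlib
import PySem

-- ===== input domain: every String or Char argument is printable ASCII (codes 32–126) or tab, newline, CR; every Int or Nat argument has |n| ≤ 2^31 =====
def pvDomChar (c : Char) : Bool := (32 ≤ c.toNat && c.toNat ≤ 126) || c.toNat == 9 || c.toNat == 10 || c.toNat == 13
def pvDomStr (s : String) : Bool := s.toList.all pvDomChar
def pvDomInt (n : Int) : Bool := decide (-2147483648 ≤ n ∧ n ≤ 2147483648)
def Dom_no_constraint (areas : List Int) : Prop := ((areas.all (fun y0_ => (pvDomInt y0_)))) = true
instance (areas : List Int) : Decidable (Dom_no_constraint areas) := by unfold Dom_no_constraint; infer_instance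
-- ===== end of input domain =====

-- B replaces A's staged scans (.index/.count per condition) by ONE streaming early-exit pass
-- over enumerate(areas), carrying the first-5 index, 6/8 first-sighting flags and seen/middle-seen
-- sets; objective: faster (one O(n) pass instead of repeated scans incl. an O(n^2) count loop).

-- ===== PORT A =====
def no_constraint (areas : List Int) : Bool :=
  -- if 5 in areas and 6 in areas: cs = areas.index(6); qg = areas.index(5); if cs == qg + 1: return False
  if (decide (5 ∈ areas) && decide (6 ∈ areas)) &&
     ((PySem.List.index? areas 6).getD 0 == (PySem.List.index? areas 5).getD 0 + 1) then
    false
  -- if 8 in areas: rg = areas.index(8); if rg < len(areas) // 2: return False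
  else if decide (8 ∈ areas) &&
     decide (((PySem.List.index? areas 8).getD 0 : Int) < PySem.Int.floordiv (areas.length : Int) 2) then
    false
  -- for area in areas[1:-1]: if areas.count(area) > 1: return False
  else if (PySem.List.slice areas (some 1) (some (-1))).any
      (fun a => PySem.List.count areas a > 1) then
    false
  else
    true

-- ===== PORT B =====
-- the for-loop of Source B: the early `return False`s become `false` leaves, the mutable state
-- (f5, seen6, seen8, seen, mid_seen) is threaded as arguments, i counts as in enumerate
def altLoop (n half i : Int) (f5 : Option Int) (seen6 seen8 : Bool)
    (seen mid : PySem.Set Int) : List Int → Bool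
  | [] => true
  | v :: t =>
    if PySem.Set.contains seen v && (decide (i < n - 1) || PySem.Set.contains mid v) then
      false
    else
      let seen' := PySem.Set.add seen v
      let mid' := if decide (1 ≤ i) && decide (i ≤ n - 2) then PySem.Set.add mid v else mid
      if v == 5 && f5.isNone then
        altLoop n half (i + 1) (some i) seen6 seen8 seen' mid' t
      else if v == 6 && !seen6 then
        if f5 == some (i - 1) then false
        else altLoop n half (i + 1) f5 true seen8 seen' mid' t
      else if v == 8 && !seen8 then
        if decide (i < half) then false
        else altLoop n half (i + 1) f5 seen6 true seen' mid' t
      else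
        altLoop n half (i + 1) f5 seen6 seen8 seen' mid' t

def no_constraint_alt (areas : List Int) : Bool :=
  -- n = len(areas); half = n // 2; loop from i = 0 with empty state
  altLoop (areas.length : Int) (PySem.Int.floordiv (areas.length : Int) 2) 0
    none false false PySem.Set.empty PySem.Set.empty areas

-- ===== PRECONDITION & SPEC =====
def Spec_no_constraint (areas : List Int) (out : Bool) : Prop := out = no_constraint_alt areas
instance (areas : List Int) (out : Bool) : Decidable (Spec_no_constraint areas out) := by unfold Spec_no_constraint; infer_instance

-- ===== CLAIM =====
def Claim_equal_no_constraint : Prop := ∀ (areas : List Int), Dom_no_constraint areas → Spec_no_constraint areas (no_constraint areas)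

-- ===== LEMMAS AND PROOFS =====

-- abstract value of Source B's f5 after scanning prefix p: the first index of 5, as an Int
def f5abs (p : List Int) : Option Int :=
  match PySem.List.index? p 5 with
  | none => none
  | some k => some ((k : Int))

-- the condition on the scanned prefix p and current element v under which the loop body of B returns False
def Trig (n half : Int) (p : List Int) (v : Int) : Prop :=
  (v ∈ p ∧ (((p.length : Int) < n - 1) ∨ v ∈ (p.drop 1).take (n - 2).toNat))
  ∨ (v = 6 ∧ 6 ∉ p ∧ f5abs p = some ((p.length : Int) - 1))
  ∨ (v = 8 ∧ 8 ∉ p ∧ (p.length : Int) < half)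

theorem f5abs_eq_none_iff (p : List Int) : f5abs p = none ↔ 5 ∉ p := by
  unfold f5abs
  cases h : PySem.List.index? p 5 with
  | none => simpa using (PySem.List.index?_eq_none_iff _ _).mp h
  | some k =>
    simp only [reduceCtorEq, false_iff, not_not]
    exact (PySem.List.index?_isSome_iff p 5).mp (by rw [h]; rfl)

theorem exists_split_cons {α : Type} (P : List α → α → Prop) (v : α) (t : List α) :
    (∃ q w r, v :: t = q ++ w :: r ∧ P q w)
      ↔ P [] v ∨ (∃ q w r, t = q ++ w :: r ∧ P (v :: q) w) := by
  constructor
  · rintro ⟨q, w, r, hsplit, hP⟩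
    cases q with
    | nil => simp_all
    | cons a q' =>
      simp only [List.cons_append, List.cons.injEq] at hsplit
      exact Or.inr ⟨q', w, r, hsplit.2, hsplit.1 ▸ hP⟩
  · rintro (h | ⟨q, w, r, rfl, hP⟩)
    · exact ⟨[], v, t, rfl, h⟩
    · exact ⟨v :: q, w, r, rfl, hP⟩

theorem set_add_contains (s : PySem.Set Int) (v w : Int) :
    (PySem.Set.add s v).contains w = (s.contains w || (w == v)) := by
  simp [PySem.Set.add, PySem.Set.contains]
  split_ifs with h <;> by_cases hw : w = v <;> simp_all

-- state update facts

theorem f5_update (p : List Int) (v : Int) :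
    f5abs (p ++ [v])
      = if v = 5 ∧ 5 ∉ p then some ((p.length : Int)) else f5abs p := by
  by_cases h5 : 5 ∈ p
  · unfold f5abs
    rw [PySem.List.index?_append_of_mem _ h5, if_neg (by simp [h5])]
  · by_cases hv : v = 5
    · subst hv
      unfold f5abs
      rw [PySem.List.index?_append_singleton_self p 5 h5, if_pos ⟨rfl, h5⟩]
    · have hno : (5 : Int) ∉ p ++ [v] := by
        simp [h5]; exact fun h => hv h.symm
      rw [(f5abs_eq_none_iff _).mpr hno, (f5abs_eq_none_iff p).mpr h5, if_neg (by tauto)]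

theorem mid_update (p : List Int) (v : Int) (n : Int) (w : Int) :
    (w ∈ ((p ++ [v]).drop 1).take (n - 2).toNat)
      ↔ (if 1 ≤ (p.length : Int) ∧ (p.length : Int) ≤ n - 2
          then w ∈ (p.drop 1).take (n - 2).toNat ∨ w = v
          else w ∈ (p.drop 1).take (n - 2).toNat) := by
  cases p with
  | nil =>
    simp
  | cons a q =>
    have hdrop : ((a :: q ++ [v]).drop 1) = q ++ [v] := rfl
    have hdrop2 : ((a :: q).drop 1) = q := rfl
    rw [hdrop, hdrop2]
    by_cases hc : 1 ≤ ((a :: q).length : Int) ∧ ((a :: q).length : Int) ≤ n - 2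
    · rw [if_pos hc]
      have h1 : q.length + 1 ≤ (n - 2).toNat := by
        simp at hc; omega
      rw [List.take_of_length_le (by simpa using h1),
          List.take_of_length_le (by omega)]
      simp
    · rw [if_neg hc]
      have h2 : (n - 2).toNat ≤ q.length := by simp at hc; omega
      rw [List.take_append_of_le_length h2]

theorem seen_update (s : PySem.Set Int) (p : List Int) (v : Int)
    (hs : ∀ w, s.contains w = decide (w ∈ p)) :
    ∀ w, (PySem.Set.add s v).contains w = decide (w ∈ p ++ [v]) := by
  intro w
  rw [set_add_contains, hs]
  by_cases hw : w = v <;> simp [hw]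

theorem mid_update_contains (p : List Int) (v n : Int) (mid : PySem.Set Int)
    (hm : ∀ w, mid.contains w = decide (w ∈ (p.drop 1).take (n - 2).toNat)) :
    ∀ w, (if decide (1 ≤ (p.length : Int)) && decide ((p.length : Int) ≤ n - 2)
            then PySem.Set.add mid v else mid).contains w
          = decide (w ∈ ((p ++ [v]).drop 1).take (n - 2).toNat) := by
  intro w
  have hiff := mid_update p v n w
  by_cases hc : 1 ≤ (p.length : Int) ∧ (p.length : Int) ≤ n - 2
  · rw [if_pos hc] at hiff
    rw [if_pos (by simp [hc.1, hc.2]), set_add_contains, hm]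
    by_cases hw : w = v <;> simp_all
  · rw [if_neg hc] at hiff
    rw [if_neg (by rcases not_and_or.mp hc with h | h <;> simp [h]), hm]
    simp_all

theorem altLoop_cons (n half i : Int) (f5 : Option Int) (s6 s8 : Bool)
    (seen mid : PySem.Set Int) (v : Int) (t : List Int) :
    altLoop n half i f5 s6 s8 seen mid (v :: t) =
      if PySem.Set.contains seen v && (decide (i < n - 1) || PySem.Set.contains mid v) then false
      else
        if v == 5 && f5.isNone then
          altLoop n half (i + 1) (some i) s6 s8 (PySem.Set.add seen v)
            (if decide (1 ≤ i) && decide (i ≤ n - 2) then PySem.Set.add mid v else mid) t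
        else if v == 6 && !s6 then
          (if f5 == some (i - 1) then false
           else altLoop n half (i + 1) f5 true s8 (PySem.Set.add seen v)
             (if decide (1 ≤ i) && decide (i ≤ n - 2) then PySem.Set.add mid v else mid) t)
        else if v == 8 && !s8 then
          (if decide (i < half) then false
           else altLoop n half (i + 1) f5 s6 true (PySem.Set.add seen v)
             (if decide (1 ≤ i) && decide (i ≤ n - 2) then PySem.Set.add mid v else mid) t)
        else altLoop n half (i + 1) f5 s6 s8 (PySem.Set.add seen v)
          (if decide (1 ≤ i) && decide (i ≤ n - 2) then PySem.Set.add mid v else mid) t := rfl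

-- loop characterisation: B's loop returns false iff some split of the remaining input fires Trig
theorem altLoop_false_iff (n half : Int) (t : List Int) : ∀ (p : List Int)
    (f5 : Option Int) (seen6 seen8 : Bool) (seen mid : PySem.Set Int),
    f5 = f5abs p →
    seen6 = decide (6 ∈ p) → seen8 = decide (8 ∈ p) →
    (∀ w, seen.contains w = decide (w ∈ p)) →
    (∀ w, mid.contains w = decide (w ∈ (p.drop 1).take (n - 2).toNat)) →
    (altLoop n half (p.length : Int) f5 seen6 seen8 seen mid t = false
      ↔ ∃ q v r, t = q ++ v :: r ∧ Trig n half (p ++ q) v) := by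
  induction t with
  | nil =>
    intro p f5 s6 s8 seen mid _ _ _ _ _
    simp [altLoop]
  | cons v t ih =>
    intro p f5 s6 s8 seen mid hf5 h6 h8 hs hm
    have hsplit : (∃ q w r, v :: t = q ++ w :: r ∧ Trig n half (p ++ q) w)
        ↔ Trig n half p v ∨ (∃ q w r, t = q ++ w :: r ∧ Trig n half ((p ++ [v]) ++ q) w) := by
      rw [exists_split_cons (fun q w => Trig n half (p ++ q) w)]
      simp only [List.append_nil, List.append_assoc, List.singleton_append]
    rw [hsplit, altLoop_cons]
    have hil : (p.length : Int) + 1 = ((p ++ [v]).length : Int) := by simp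
    have hs' := seen_update seen p v hs
    have hm' := mid_update_contains p v n mid hm
    by_cases hT1 : v ∈ p ∧ (((p.length : Int) < n - 1) ∨ v ∈ (p.drop 1).take (n - 2).toNat)
    · rw [if_pos (by rw [hs, hm, ← Bool.decide_or, ← Bool.decide_and]; exact decide_eq_true hT1)]
      exact iff_of_true rfl (Or.inl (Or.inl hT1))
    · rw [if_neg (by rw [hs, hm, ← Bool.decide_or, ← Bool.decide_and, decide_eq_true_eq]; exact hT1)]
      by_cases hB5 : v = 5 ∧ f5 = none
      · -- first-5 branch
        have h5np : (5 : Int) ∉ p := (f5abs_eq_none_iff p).mp (hB5.2 ▸ hf5.symm)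
        rw [if_pos (by simp [hB5.1, hB5.2])]
        have hf5n : some ((p.length : Int)) = f5abs (p ++ [v]) := by
          rw [f5_update, if_pos ⟨hB5.1, h5np⟩]
        have hnT : ¬ Trig n half p v := by
          rintro (h | ⟨h6v, -⟩ | ⟨h8v, -⟩)
          · exact hT1 h
          · rw [hB5.1] at h6v; norm_num at h6v
          · rw [hB5.1] at h8v; norm_num at h8v
        rw [hil, ih (p ++ [v]) _ _ _ _ _ hf5n
          (by rw [h6]; simp [show (6 : Int) ≠ v from by rw [hB5.1]; norm_num])
          (by rw [h8]; simp [show (8 : Int) ≠ v from by rw [hB5.1]; norm_num])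
          hs' hm']
        exact (or_iff_right hnT).symm
      · rw [if_neg (by rcases not_and_or.mp hB5 with h | h <;> simp [h, Option.isNone_iff_eq_none])]
        have hf5k : f5 = f5abs (p ++ [v]) := by
          rw [f5_update, if_neg]
          · exact hf5
          · rintro ⟨rfl, h5np⟩
            exact hB5 ⟨rfl, hf5.trans ((f5abs_eq_none_iff p).mpr h5np)⟩
        by_cases hB6 : v = 6 ∧ s6 = false
        · have h6np : (6 : Int) ∉ p := by
            rw [h6] at hB6; simpa using hB6.2
          rw [if_pos (by simp [hB6.1, hB6.2])]
          by_cases hF : f5 = some ((p.length : Int) - 1)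
          · rw [if_pos (by simp [hF])]
            exact iff_of_true rfl (Or.inl (Or.inr (Or.inl ⟨hB6.1, h6np, hf5 ▸ hF⟩)))
          · rw [if_neg (by simp [hF])]
            have hnT : ¬ Trig n half p v := by
              rintro (h | ⟨-, -, hmap⟩ | ⟨h8v, -⟩)
              · exact hT1 h
              · exact hF (hf5.trans hmap)
              · rw [hB6.1] at h8v; norm_num at h8v
            rw [hil, ih (p ++ [v]) _ _ _ _ _ hf5k
              (by simp [hB6.1])
              (by rw [h8]; simp [show (8 : Int) ≠ v from by rw [hB6.1]; norm_num])
              hs' hm']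
            exact (or_iff_right hnT).symm
        · rw [if_neg (by rcases not_and_or.mp hB6 with h | h <;> simp_all)]
          have h6k : s6 = decide (6 ∈ p ++ [v]) := by
            by_cases hv6 : v = 6
            · have : s6 = true := by
                rcases not_and_or.mp hB6 with h | h
                · exact absurd hv6 h
                · simpa using h
              rw [this]; simp [hv6]
            · rw [h6]; simp [show (6 : Int) ≠ v from fun h => hv6 h.symm]
          by_cases hB8 : v = 8 ∧ s8 = false
          · have h8np : (8 : Int) ∉ p := by
              rw [h8] at hB8; simpa using hB8.2
            rw [if_pos (by simp [hB8.1, hB8.2])]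
            by_cases hH : (p.length : Int) < half
            · rw [if_pos (by simpa using hH)]
              exact iff_of_true rfl (Or.inl (Or.inr (Or.inr ⟨hB8.1, h8np, hH⟩)))
            · rw [if_neg (by simpa using hH)]
              have hnT : ¬ Trig n half p v := by
                rintro (h | ⟨h6v, -⟩ | ⟨-, -, hlt⟩)
                · exact hT1 h
                · rw [hB8.1] at h6v; norm_num at h6v
                · exact hH hlt
              rw [hil, ih (p ++ [v]) _ _ _ _ _ hf5k h6k (by simp [hB8.1]) hs' hm']
              exact (or_iff_right hnT).symm
          · rw [if_neg (by rcases not_and_or.mp hB8 with h | h <;> simp_all)]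
            have h8k : s8 = decide (8 ∈ p ++ [v]) := by
              by_cases hv8 : v = 8
              · have : s8 = true := by
                  rcases not_and_or.mp hB8 with h | h
                  · exact absurd hv8 h
                  · simpa using h
                rw [this]; simp [hv8]
              · rw [h8]; simp [show (8 : Int) ≠ v from fun h => hv8 h.symm]
            have hnT : ¬ Trig n half p v := by
              rintro (h | ⟨h6v, h6np, -⟩ | ⟨h8v, h8np, -⟩)
              · exact hT1 h
              · exact hB6 ⟨h6v, by rw [h6]; simpa using h6np⟩
              · exact hB8 ⟨h8v, by rw [h8]; simpa using h8np⟩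
            rw [hil, ih (p ++ [v]) _ _ _ _ _ hf5k h6k h8k hs' hm']
            exact (or_iff_right hnT).symm

-- areas[1:-1] as drop/take
theorem slice_mid (A : List Int) :
    PySem.List.slice A (some 1) (some (-1)) = (A.drop 1).take (A.length - 2) := by
  simp only [PySem.List.slice, PySem.List.clampIdx]
  norm_num
  cases A with
  | nil => simp
  | cons a l =>
    rw [if_neg (by simp)]
    have h1 : min 1 (a :: l).length = 1 := by simp
    rw [h1, List.drop_one, List.tail_cons]
    congr 1
    simp

theorem count_two (q r : List Int) (v : Int) (hv : v ∈ q) :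
    1 < PySem.List.count (q ++ v :: r) v := by
  rw [PySem.List.count_eq, List.count_append, List.count_cons_self]
  have : 0 < q.count v := List.count_pos_iff.mpr hv
  omega

theorem mem_mid_iff (A : List Int) (m : Nat) (v : Int) :
    v ∈ (A.drop 1).take m ↔ ∃ k, ∃ hk : k < A.length, 1 ≤ k ∧ k ≤ m ∧ A[k] = v := by
  rw [List.mem_iff_getElem]
  constructor
  · rintro ⟨i, hi, hv⟩
    have hi' : i < m ∧ i < A.length - 1 := by
      simp [List.length_take] at hi; omega
    refine ⟨1 + i, by omega, by omega, by omega, ?_⟩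
    rw [List.getElem_take, List.getElem_drop] at hv
    exact hv
  · rintro ⟨k, hk, h1, hm, hv⟩
    refine ⟨k - 1, ?_, ?_⟩
    · simp [List.length_take]; omega
    · rw [List.getElem_take, List.getElem_drop]
      have hik : 1 + (k - 1) = k := by omega
      exact (getElem_congr_idx hik).trans hv

theorem take_mem_at (L : List Int) (b i : Nat) (hb : b < L.length) (hi : i < b)
    (hv : L[i]'(by omega) = v) : v ∈ L.take b := by
  rw [List.mem_iff_getElem]
  refine ⟨i, by simp [List.length_take]; omega, ?_⟩
  rw [List.getElem_take]
  exact hv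

theorem T1_split (L : List Int) (v : Int) (b : Nat) (hb : b < L.length)
    (hbv : L[b] = v) (i : Nat) (hib : i < b) (hiv : L[i]'(by omega) = v)
    (hdisj : ((b : Int) < (L.length : Int) - 1 ∨
      v ∈ ((L.take b).drop 1).take (L.length - 2))) :
    ∃ q w r, L = q ++ w :: r ∧ w ∈ q ∧
      ((q.length : Int) < (L.length : Int) - 1 ∨ w ∈ (q.drop 1).take (L.length - 2)) := by
  refine ⟨L.take b, v, L.drop (b + 1), ?_, ?_, ?_⟩
  · have h := List.take_append_drop b L
    rw [List.drop_eq_getElem_cons hb, hbv] at h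
    exact h.symm
  · exact take_mem_at L b i hb hib hiv
  · have hlen : (L.take b).length = b := by simp [List.length_take]; omega
    rw [hlen]
    exact hdisj

-- the duplicate trigger over all splits coincides with A's middle-slice count test
theorem T1_iff (A : List Int) :
    (∃ q v r, A = q ++ v :: r ∧ v ∈ q ∧
        ((q.length : Int) < (A.length : Int) - 1 ∨
          v ∈ (q.drop 1).take (((A.length : Int)) - 2).toNat))
      ↔ ∃ v ∈ (A.drop 1).take (A.length - 2), 1 < PySem.List.count A v := by
  have htn : (((A.length : Int)) - 2).toNat = A.length - 2 := by omega
  rw [htn]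
  constructor
  · rintro ⟨q, v, r, hA, hvq, hdisj⟩
    subst hA
    have hjlen : q.length < (q ++ v :: r).length := by simp
    have hget : (q ++ v :: r)[q.length]'hjlen = v := by
      rw [List.getElem_append_right (le_refl _)]; simp
    have hq1 : 1 ≤ q.length := List.length_pos_iff.mpr (by rintro rfl; simp at hvq)
    refine ⟨v, ?_, count_two q r v hvq⟩
    rw [mem_mid_iff]
    rcases hdisj with hlt | hmid
    · refine ⟨q.length, hjlen, hq1, by simp at hlt ⊢; omega, hget⟩
    · obtain ⟨k, hk, hk1, hk2, hqk⟩ := (mem_mid_iff q _ v).mp hmid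
      refine ⟨k, by simp; omega, hk1, hk2, ?_⟩
      rw [List.getElem_append_left hk]
      exact hqk
  · rintro ⟨v, hvM, hcnt⟩
    obtain ⟨k, hk, hk1, hk2, hAk⟩ := (mem_mid_iff A _ v).mp hvM
    have hvA : v ∈ A := hAk ▸ List.getElem_mem _
    obtain ⟨i1, hi1⟩ := Option.isSome_iff_exists.mp ((PySem.List.index?_isSome_iff A v).mpr hvA)
    obtain ⟨P, S, hsplit, hPlen, hvP⟩ := (PySem.List.index?_eq_some_iff _ _ _).mp hi1
    subst hsplit
    have hvS : v ∈ S := by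
      rw [PySem.List.count_eq, List.count_append, List.count_cons_self,
        List.count_eq_zero.mpr hvP] at hcnt
      exact List.count_pos_iff.mp (by omega)
    obtain ⟨js, hjs, hSjs⟩ := List.mem_iff_getElem.mp hvS
    have hPv : (P ++ v :: S)[P.length]'(by simp) = v := by
      rw [List.getElem_append_right (le_refl _)]; simp
    by_cases hki : k = P.length
    · -- middle occurrence is the first; split at the second occurrence
      have hblen : P.length + 1 + js < (P ++ v :: S).length := by simp; omega
      have hbv : (P ++ v :: S)[P.length + 1 + js]'hblen = v := by
        rw [List.getElem_append_right (by omega)]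
        have : P.length + 1 + js - P.length = js + 1 := by omega
        simp only [this, List.getElem_cons_succ]
        exact hSjs
      refine T1_split _ v (P.length + 1 + js) hblen hbv P.length (by omega) hPv ?_
      by_cases hbig : (P.length + 1 + js : Int) < ((P ++ v :: S).length : Int) - 1
      · exact Or.inl hbig
      · refine Or.inr ?_
        rw [mem_mid_iff]
        have hklt : k < P.length + 1 + js := by omega
        refine ⟨k, by simp; omega, hk1, ?_, ?_⟩
        · simp at hk2 ⊢; omega
        · rw [List.getElem_take]
          exact hAk
    · -- middle occurrence is a later occurrence; split there
      have hkgt : P.length < k := by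
        rcases Nat.lt_or_ge k P.length with h | h
        · exfalso
          apply hvP
          have : (P ++ v :: S)[k]'hk = P[k]'h := List.getElem_append_left h
          rw [this] at hAk
          exact hAk ▸ List.getElem_mem _
        · omega
      refine T1_split _ v k hk hAk P.length hkgt hPv (Or.inl ?_)
      simp at hk2 ⊢
      omega

-- the first-6-right-after-first-5 trigger coincides with A's index comparison
theorem T2_iff (A : List Int) :
    (∃ q v r, A = q ++ v :: r ∧ v = 6 ∧ 6 ∉ q ∧ f5abs q = some ((q.length : Int) - 1))
      ↔ (5 ∈ A ∧ 6 ∈ A ∧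
          ((PySem.List.index? A 6).getD 0 = (PySem.List.index? A 5).getD 0 + 1)) := by
  constructor
  · rintro ⟨q, v, r, rfl, rfl, h6q, hf⟩
    unfold f5abs at hf
    cases h5 : PySem.List.index? q 5 with
    | none => rw [h5] at hf; simp at hf
    | some k =>
      rw [h5] at hf
      have h5m : (5 : Int) ∈ q := (PySem.List.index?_isSome_iff q 5).mp (by rw [h5]; rfl)
      have hk : (k : Int) = (q.length : Int) - 1 := by simpa using hf
      have hq : 1 ≤ q.length := List.length_pos_iff.mpr (by rintro rfl; simp at h5m)
      have h6A : PySem.List.index? (q ++ 6 :: r) 6 = some q.length :=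
        (PySem.List.index?_eq_some_iff _ _ _).mpr ⟨q, r, rfl, rfl, h6q⟩
      have h5A : PySem.List.index? (q ++ 6 :: r) 5 = some k := by
        rw [PySem.List.index?_append_of_mem _ h5m, h5]
      refine ⟨by simp [h5m], by simp, ?_⟩
      rw [h6A, h5A]
      simp only [Option.getD_some]
      omega
  · rintro ⟨h5, h6, heq⟩
    obtain ⟨k6, hk6⟩ := Option.isSome_iff_exists.mp ((PySem.List.index?_isSome_iff A 6).mpr h6)
    obtain ⟨k5, hk5⟩ := Option.isSome_iff_exists.mp ((PySem.List.index?_isSome_iff A 5).mpr h5)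
    rw [hk6, hk5] at heq
    simp only [Option.getD_some] at heq
    obtain ⟨q, r, hsplit, hlen, h6q⟩ := (PySem.List.index?_eq_some_iff _ _ _).mp hk6
    subst hsplit
    obtain ⟨hk5lt, hA5, -⟩ := PySem.List.getElem_of_index?_eq_some hk5
    refine ⟨q, 6, r, rfl, rfl, h6q, ?_⟩
    have hk5q : k5 < q.length := by omega
    rw [List.getElem_append_left hk5q] at hA5
    have h5q : (5 : Int) ∈ q := hA5 ▸ List.getElem_mem _
    have hidx : PySem.List.index? q 5 = some k5 := by
      rw [← PySem.List.index?_append_of_mem (6 :: r) h5q, hk5]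
    have hc : (k5 : Int) = (q.length : Int) - 1 := by omega
    unfold f5abs
    rw [hidx]
    simp [hc]

-- the first-8-in-first-half trigger coincides with A's index bound
theorem T3_iff (A : List Int) (half : Int) :
    (∃ q v r, A = q ++ v :: r ∧ v = 8 ∧ 8 ∉ q ∧ (q.length : Int) < half)
      ↔ (8 ∈ A ∧ (((PySem.List.index? A 8).getD 0 : Int) < half)) := by
  constructor
  · rintro ⟨q, v, r, rfl, rfl, h8q, hlt⟩
    have h8A : PySem.List.index? (q ++ 8 :: r) 8 = some q.length :=
      (PySem.List.index?_eq_some_iff _ _ _).mpr ⟨q, r, rfl, rfl, h8q⟩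
    refine ⟨by simp, ?_⟩
    rw [h8A]
    simpa using hlt
  · rintro ⟨h8, hlt⟩
    obtain ⟨k8, hk8⟩ := Option.isSome_iff_exists.mp ((PySem.List.index?_isSome_iff A 8).mpr h8)
    obtain ⟨q, r, hsplit, hlen, h8q⟩ := (PySem.List.index?_eq_some_iff _ _ _).mp hk8
    rw [hk8] at hlt
    simp only [Option.getD_some] at hlt
    exact ⟨q, 8, r, hsplit, rfl, h8q, by rw [hlen]; exact hlt⟩

theorem alt_false_iff (A : List Int) :
    no_constraint_alt A = false
      ↔ ∃ q v r, A = q ++ v :: r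
          ∧ Trig (A.length : Int) (PySem.Int.floordiv (A.length : Int) 2) q v := by
  unfold no_constraint_alt
  have h := altLoop_false_iff (A.length : Int) (PySem.Int.floordiv (A.length : Int) 2) A []
    none false false PySem.Set.empty PySem.Set.empty
    (by simp [f5abs, PySem.List.index?_eq_idxOf?])
    (by simp) (by simp)
    (fun w => by simp [PySem.Set.empty, PySem.Set.contains])
    (fun w => by simp [PySem.Set.empty, PySem.Set.contains])
  simpa using h

theorem a_false_iff (A : List Int) :
    no_constraint A = false
      ↔ ((5 ∈ A ∧ 6 ∈ A ∧ ((PySem.List.index? A 6).getD 0 = (PySem.List.index? A 5).getD 0 + 1))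
        ∨ (8 ∈ A ∧ (((PySem.List.index? A 8).getD 0 : Int) < PySem.Int.floordiv (A.length : Int) 2))
        ∨ (∃ v ∈ PySem.List.slice A (some 1) (some (-1)), 1 < PySem.List.count A v)) := by
  unfold no_constraint
  split_ifs with h1 h2 h3
  · simp only [Bool.and_eq_true, decide_eq_true_eq, beq_iff_eq] at h1
    exact iff_of_true rfl (Or.inl ⟨h1.1.1, h1.1.2, h1.2⟩)
  · simp only [Bool.and_eq_true, decide_eq_true_eq] at h2
    exact iff_of_true rfl (Or.inr (Or.inl h2))
  · simp only [List.any_eq_true, decide_eq_true_eq] at h3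
    exact iff_of_true rfl (Or.inr (Or.inr h3))
  · refine iff_of_false (by simp) ?_
    rintro (⟨ha, hb, hc⟩ | ⟨ha, hb⟩ | ⟨v, hv, hc⟩)
    · exact h1 (by
        simp only [Bool.and_eq_true, decide_eq_true_eq, beq_iff_eq]
        exact ⟨⟨ha, hb⟩, hc⟩)
    · exact h2 (by
        simp only [Bool.and_eq_true, decide_eq_true_eq]
        exact ⟨ha, hb⟩)
    · exact h3 (by simp only [List.any_eq_true, decide_eq_true_eq]; exact ⟨v, hv, hc⟩)

-- the three triggers together are exactly A's three conditions
theorem bridge (A : List Int) :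
    (∃ q v r, A = q ++ v :: r
        ∧ Trig (A.length : Int) (PySem.Int.floordiv (A.length : Int) 2) q v)
      ↔ ((5 ∈ A ∧ 6 ∈ A ∧ ((PySem.List.index? A 6).getD 0 = (PySem.List.index? A 5).getD 0 + 1))
        ∨ (8 ∈ A ∧ (((PySem.List.index? A 8).getD 0 : Int) < PySem.Int.floordiv (A.length : Int) 2))
        ∨ (∃ v ∈ PySem.List.slice A (some 1) (some (-1)), 1 < PySem.List.count A v)) := by
  have hdist : (∃ q v r, A = q ++ v :: r
        ∧ Trig (A.length : Int) (PySem.Int.floordiv (A.length : Int) 2) q v)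
      ↔ ((∃ q v r, A = q ++ v :: r ∧ v ∈ q ∧
            ((q.length : Int) < (A.length : Int) - 1 ∨
              v ∈ (q.drop 1).take (((A.length : Int)) - 2).toNat))
        ∨ (∃ q v r, A = q ++ v :: r ∧ v = 6 ∧ 6 ∉ q ∧ f5abs q = some ((q.length : Int) - 1))
        ∨ (∃ q v r, A = q ++ v :: r ∧ v = 8 ∧ 8 ∉ q ∧
            (q.length : Int) < PySem.Int.floordiv (A.length : Int) 2)) := by
    unfold Trig
    constructor
    · rintro ⟨q, v, r, hh, (h | h | h)⟩
      · exact Or.inl ⟨q, v, r, hh, h.1, h.2⟩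
      · exact Or.inr (Or.inl ⟨q, v, r, hh, h⟩)
      · exact Or.inr (Or.inr ⟨q, v, r, hh, h⟩)
    · rintro (⟨q, v, r, hh, h1, h2⟩ | ⟨q, v, r, hh, h⟩ | ⟨q, v, r, hh, h⟩)
      · exact ⟨q, v, r, hh, Or.inl ⟨h1, h2⟩⟩
      · exact ⟨q, v, r, hh, Or.inr (Or.inl h)⟩
      · exact ⟨q, v, r, hh, Or.inr (Or.inr h)⟩
  rw [hdist, T1_iff, T2_iff, T3_iff, slice_mid]
  exact ⟨fun h => h.elim (fun x => Or.inr (Or.inr x))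
      (fun h => h.elim Or.inl (fun b => Or.inr (Or.inl b))),
    fun h => h.elim (fun a => Or.inr (Or.inl a))
      (fun h => h.elim (fun b => Or.inr (Or.inr b)) Or.inl)⟩


-- ===== VERDICT =====
theorem no_constraint_spec : Claim_equal_no_constraint := by
  intro areas _
  unfold Spec_no_constraint
  have hiff : (no_constraint areas = false ↔ no_constraint_alt areas = false) :=
    (a_false_iff areas).trans ((alt_false_iff areas).trans (bridge areas)).symm
  cases h1 : no_constraint areas <;> cases h2 : no_constraint_alt areas <;>
    rw [h1, h2] at hiff <;> simp_all
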